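-- pv_equiv track=rewrite | github.com/ADRapanot/Webflow-OpenAI-CMS-Automation | scripts/scrape_looker_reports.py | iter_object_literals
-- ===== SOURCE A (Python) =====
-- from typing import Iterable, List, Optional
--
-- def iter_object_literals(array_src: str) -> Iterable[str]:
--     depth = 0
--     start = None
--     in_string = False
--     string_quote = ""
--     escape = False
--
--     for index, char in enumerate(array_src):
--         if in_string:
--             if escape:
--                 escape = False
--             elif char == "\\":
--                 escape = True
--             elif char == string_quote:
--                 in_string = False
--         else:
--             if char in ('"', "'"):
--                 in_string = True
--                 string_quote = char
--             elif char == "{":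
--                 if depth == 0:
--                     start = index
--                 depth += 1
--             elif char == "}":
--                 depth -= 1
--                 if depth == 0 and start is not None:
--                     yield array_src[start : index + 1]
--                     start = None
--     return []
-- ===== SOURCE B (Python) =====
-- def iter_object_literals(array_src: str):
--     # Pass 1: mask out string literals (their contents and the quote
--     # delimiters become spaces), keeping length and all other chars.
--     mask = []
--     in_string = False
--     quote = ""
--     escape = False
--     for ch in array_src:
--         if in_string:
--             mask.append(" ")
--             if escape:
--                 escape = False
--             elif ch == "\\":
--                 escape = True
--             elif ch == quote:
--                 in_string = False
--         elif ch in ('"', "'"):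
--             in_string = True
--             quote = ch
--             mask.append(" ")
--         else:
--             mask.append(ch)
--     # Pass 2: brace-depth scan over the mask, recording top-level ranges.
--     ranges = []
--     depth = 0
--     start = -1
--     for i, ch in enumerate(mask):
--         if ch == "{":
--             if depth == 0:
--                 start = i
--             depth += 1
--         elif ch == "}":
--             depth -= 1
--             if depth == 0 and start >= 0:
--                 ranges.append((start, i + 1))
--                 start = -1
--     return [array_src[a:b] for a, b in ranges]
-- ===== Notes on version B (the rewrite author's own statement) =====
-- stated objective: alternative
-- what changed: Replaces A's single fused quote/escape+brace state machine (with inline yields) by two independent passes: pass 1 masks string literals (contents and quote delimiters become spaces), pass 2 is a pure brace-depth scan over the mask that records (start,end) index ranges; the result is produced by slicing the original string at those ranges.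
import Mathlib
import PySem

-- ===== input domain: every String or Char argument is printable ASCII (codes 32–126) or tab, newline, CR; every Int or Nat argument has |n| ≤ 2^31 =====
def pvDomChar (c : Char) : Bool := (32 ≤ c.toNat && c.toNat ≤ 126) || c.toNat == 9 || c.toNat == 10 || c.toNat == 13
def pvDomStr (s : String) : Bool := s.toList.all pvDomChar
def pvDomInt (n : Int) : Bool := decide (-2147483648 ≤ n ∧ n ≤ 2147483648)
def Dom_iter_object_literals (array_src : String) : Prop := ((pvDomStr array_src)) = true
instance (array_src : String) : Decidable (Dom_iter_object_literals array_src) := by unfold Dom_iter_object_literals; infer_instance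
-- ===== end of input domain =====

-- B replaces A's fused scanner by a string-masking pass plus a separate
-- brace-depth range scan (alternative decomposition, same cost).

-- ===== PORT A =====
-- A's fused loop: quote/escape tracking and brace depth in one pass, yielding
-- array_src[start:index+1] (a nonnegative-bounds slice, PySem.List.slice) inline.
def goA (src : List Char) (rest : List Char) (index : Nat) (depth : Int)
    (start : Option Nat) (instr : Bool) (quote : Char) (esc : Bool) : List String :=
  match rest with
  | [] => []
  | c :: rs =>
    if instr then
      if esc then goA src rs (index+1) depth start true quote false
      else if c = '\\' then goA src rs (index+1) depth start true quote true
      else if c = quote then goA src rs (index+1) depth start false quote esc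
      else goA src rs (index+1) depth start true quote esc
    else
      if c = '"' ∨ c = '\'' then goA src rs (index+1) depth start true c esc
      else if c = '{' then
        goA src rs (index+1) (depth+1) (if depth = 0 then some index else start) false quote esc
      else if c = '}' then
        if depth - 1 = 0 then
          match start with
          | some a =>
              String.ofList (PySem.List.slice src (some (a : Int)) (some ((index+1 : Nat) : Int)))
                :: goA src rs (index+1) (depth-1) none false quote esc
          | none => goA src rs (index+1) (depth-1) none false quote esc
        else goA src rs (index+1) (depth-1) start false quote esc
      else goA src rs (index+1) depth start false quote esc

def iter_object_literals (array_src : String) : List String :=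
  goA array_src.toList array_src.toList 0 0 none false ' ' false

-- ===== PORT B =====
-- Pass 1: same-length mask, string-literal contents and quote delimiters become ' '.
def maskB (rest : List Char) (instr : Bool) (quote : Char) (esc : Bool) : List Char :=
  match rest with
  | [] => []
  | c :: rs =>
    if instr then
      ' ' :: (if esc then maskB rs true quote false
              else if c = '\\' then maskB rs true quote true
              else if c = quote then maskB rs false quote esc
              else maskB rs true quote esc)
    else if c = '"' ∨ c = '\'' then ' ' :: maskB rs true c esc
    else c :: maskB rs false quote esc

-- Pass 2: brace-depth scan recording top-level (start, end) ranges; start sentinel -1.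
def rangesB (rest : List Char) (i : Nat) (depth : Int) (start : Int) : List (Int × Nat) :=
  match rest with
  | [] => []
  | c :: rs =>
    if c = '{' then rangesB rs (i+1) (depth+1) (if depth = 0 then (i : Int) else start)
    else if c = '}' then
      if depth - 1 = 0 ∧ start ≥ 0 then (start, i+1) :: rangesB rs (i+1) (depth-1) (-1)
      else rangesB rs (i+1) (depth-1) start
    else rangesB rs (i+1) depth start

def iter_object_literals_alt (array_src : String) : List String :=
  (rangesB (maskB array_src.toList false ' ' false) 0 0 (-1)).map
    (fun ab => String.ofList (PySem.List.slice array_src.toList (some ab.1) (some ((ab.2 : Nat) : Int))))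

-- ===== PRECONDITION & SPEC =====
def Spec_iter_object_literals (array_src : String) (out : List String) : Prop := out = iter_object_literals_alt array_src
instance (array_src : String) (out : List String) : Decidable (Spec_iter_object_literals array_src out) := by unfold Spec_iter_object_literals; infer_instance

-- ===== CLAIM (what is proved, stated in full; the proofs are below) =====
def Claim_equal_iter_object_literals : Prop := ∀ (array_src : String), Dom_iter_object_literals array_src → Spec_iter_object_literals array_src (iter_object_literals array_src)

-- ===== LEMMAS AND PROOFS =====

-- A's Option Nat start ↔ B's Int start sentinel.
def encStart : Option Nat → Int
  | none => -1
  | some n => (n : Int)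

theorem goA_eq_ranges (src : List Char) (rest : List Char) :
    ∀ (index : Nat) (depth : Int) (start : Option Nat) (instr : Bool) (quote : Char) (esc : Bool),
    goA src rest index depth start instr quote esc
      = (rangesB (maskB rest instr quote esc) index depth (encStart start)).map
          (fun ab => String.ofList (PySem.List.slice src (some ab.1) (some ((ab.2 : Nat) : Int)))) := by
  induction rest with
  | nil => intro index depth start instr quote esc; simp [goA, maskB, rangesB]
  | cons c rs ih =>
    intro index depth start instr quote esc
    by_cases hinstr : instr = true
    · subst hinstr
      by_cases hesc : esc = true
      · subst hesc
        simp [goA, maskB, rangesB, ih]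
      · simp only [Bool.not_eq_true] at hesc; subst hesc
        by_cases hbs : c = '\\'
        · subst hbs; simp [goA, maskB, rangesB, ih]
        · by_cases hq : c = quote
          · subst hq; simp [goA, maskB, rangesB, hbs, ih]
          · simp [goA, maskB, rangesB, hbs, hq, ih]
    · simp only [Bool.not_eq_true] at hinstr; subst hinstr
      by_cases hquo : c = '"' ∨ c = '\''
      · rcases hquo with h | h <;> subst h <;> simp [goA, maskB, rangesB, ih]
      · by_cases hob : c = '{'
        · subst hob
          simp [goA, maskB, rangesB, ih]
          congr 1
          cases start <;> by_cases hd : depth = 0 <;> simp [hd, encStart]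
        · by_cases hcb : c = '}'
          · subst hcb
            by_cases hd : depth - 1 = 0
            · cases start with
              | none => simp [goA, maskB, rangesB, hd, encStart, ih]
              | some a => simp [goA, maskB, rangesB, hd, encStart, ih]
            · cases start with
              | none => simp [goA, maskB, rangesB, hd, encStart, ih]
              | some a => simp [goA, maskB, rangesB, hd, encStart, ih]
          · simp [goA, maskB, rangesB, hquo, hob, hcb, ih]

-- ===== VERDICT (by name: the statement is the Claim_ definition above) =====
theorem iter_object_literals_spec : Claim_equal_iter_object_literals := by
  intro array_src _
  unfold Spec_iter_object_literals iter_object_literals iter_object_literals_alt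
  simpa [encStart] using goA_eq_ranges array_src.toList array_src.toList 0 0 none false ' ' false
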